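-- pv_equiv track=rewrite | github.com/bond-lab/IMI | www/cgi-bin/ntumc_util.py | sql_escape
-- ===== SOURCE A (Python) =====
-- def sql_escape(text):
--     """Duplicates instances of ' and " in the given text"""
--     quotes = [
--         '"',  # double quotes
--         "'"   # single quotes
--     ]
--     final = [
--         letter * 2 if (letter in quotes) else letter
--         for letter in text
--     ]
--     return ''.join(final)
-- ===== SOURCE B (Python) =====
-- def sql_escape(text):
--     """Duplicates instances of ' and " in the given text"""
--     return text.replace('"', '""').replace("'", "''")
-- ===== Notes on version B (the rewrite author's own statement) =====
-- stated objective: faster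
-- what changed: Replaced the per-character membership-testing comprehension plus join with two chained str.replace scans, one per quote character, running at C speed.
import Mathlib
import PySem

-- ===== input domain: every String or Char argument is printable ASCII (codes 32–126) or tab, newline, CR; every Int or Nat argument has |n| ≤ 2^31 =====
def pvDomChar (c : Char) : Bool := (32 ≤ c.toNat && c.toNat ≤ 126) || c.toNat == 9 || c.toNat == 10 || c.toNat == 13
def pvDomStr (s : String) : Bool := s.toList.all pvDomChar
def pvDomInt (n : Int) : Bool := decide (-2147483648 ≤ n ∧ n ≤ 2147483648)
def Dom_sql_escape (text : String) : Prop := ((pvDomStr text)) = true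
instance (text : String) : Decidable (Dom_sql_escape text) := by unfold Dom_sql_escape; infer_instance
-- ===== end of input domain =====

-- B replaces A's per-character membership-testing comprehension with two chained str.replace scans (idiomatic).

-- ===== PORT A =====
def sql_escape (text : String) : String :=
  let quotes : List Char := ['"', '\'']
  let final : List String :=
    text.toList.map (fun letter =>
      if letter ∈ quotes then String.ofList [letter, letter] else String.ofList [letter])
  PySem.Str.join "" final

-- ===== PORT B =====
def sql_escape_alt (text : String) : String :=
  PySem.Str.replace (PySem.Str.replace text "\"" "\"\"") "'" "''"

-- ===== PRECONDITION & SPEC =====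
def Spec_sql_escape (text : String) (out : String) : Prop := out = sql_escape_alt text
instance (text : String) (out : String) : Decidable (Spec_sql_escape text out) := by unfold Spec_sql_escape; infer_instance

-- ===== CLAIM (what is proved, stated in full; the proofs are below) =====
def Claim_equal_sql_escape : Prop := ∀ (text : String), Dom_sql_escape text → Spec_sql_escape text (sql_escape text)

-- ===== LEMMAS AND PROOFS =====

-- replace with a single-char pattern is a per-character flatMap
theorem replace_go_single (q : Char) (new : List Char) :
    ∀ (fuel : Nat) (l acc : List Char), l.length ≤ fuel →
      PySem.Chars.replace.go [q] new fuel l acc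
        = acc.reverse ++ l.flatMap (fun c => if c = q then new else [c]) := by
  intro fuel
  induction fuel with
  | zero =>
    intro l acc h
    have : l = [] := List.length_eq_zero_iff.mp (Nat.le_zero.mp h)
    subst this
    simp [PySem.Chars.replace.go]
  | succ n ih =>
    intro l acc h
    cases l with
    | nil => simp [PySem.Chars.replace.go]
    | cons c t =>
      simp only [PySem.Chars.replace.go, List.isPrefixOf]
      by_cases hc : c = q
      · subst hc
        rw [if_pos (by simp : (c == c && true) = true), ih]
        · simp
        · simpa using Nat.le_of_succ_le_succ h
      · have hqc : (q == c) = false :=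
          beq_eq_false_iff_ne.mpr (fun h2 => hc h2.symm)
        rw [if_neg (by simp [hqc] : ¬ ((q == c && true) = true)), ih]
        · simp [hc]
        · simpa using Nat.le_of_succ_le_succ h

theorem replace_single (q : Char) (new l : List Char) :
    PySem.Chars.replace l [q] new = l.flatMap (fun c => if c = q then new else [c]) := by
  rw [PySem.Chars.replace]
  simp [replace_go_single q new l.length l [] (Nat.le_refl _)]

theorem intercalate_nil (xss : List (List Char)) : ([] : List Char).intercalate xss = xss.flatten := by
  induction xss with
  | nil => simp [List.intercalate]
  | cons x xs ih =>
    cases xs with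
    | nil => simp [List.intercalate]
    | cons y ys =>
      simp only [List.intercalate, List.intersperse] at *
      simp_all

-- ===== VERDICT (by name: the statement is the Claim_ definition above) =====
theorem sql_escape_spec : Claim_equal_sql_escape := by
  intro text _
  unfold Spec_sql_escape sql_escape sql_escape_alt
  apply String.toList_inj.mp
  have e1 : ("\"" : String).toList = ['"'] := by decide
  have e2 : ("\"\"" : String).toList = ['"', '"'] := by decide
  have e3 : ("'" : String).toList = ['\''] := by decide
  have e4 : ("''" : String).toList = ['\'', '\''] := by decide
  have e0 : ("" : String).toList = [] := by decide
  simp only [PySem.Str.toList_join, PySem.Str.toList_replace, PySem.Chars.join,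
    e0, e1, e2, e3, e4, replace_single, List.flatMap_assoc]
  rw [intercalate_nil, List.flatten_eq_flatMap, List.flatMap_map, List.flatMap_map]
  apply List.flatMap_congr
  intro c _
  by_cases h1 : c = '"' <;> by_cases h2 : c = '\'' <;>
    simp_all [List.mem_cons]
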